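-- pv_equiv track=rewrite | github.com/HN67/nsapi | wa/cross.py | missing_crosses
-- ===== SOURCE A (Python) =====
-- import typing as t
--
-- def missing_crosses(
--     reference: t.Mapping[str, t.Iterable[str]]
-- ) -> t.Mapping[str, t.Iterable[str]]:
--     """Produce the nations that have not been endorsed by each nation.
--
--     Cross references a mapping of the endorsements of each nation.
--     """
--
--     # We need to make sure that the iterable of endorsers is reusable
--     # Also make it a set so lookups are faster
--     data: t.Mapping[str, t.Set[str]] = {
--         nation: set(endorsers) for nation, endorsers in reference.items()
--     }
--
--     return {
--         # Note: We MUST use a list comprehension here, not a generator,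
--         # because if we have a lazy iterable, it will use the `nation` closure
--         # which will just be the last one in the data
--         nation: [
--             other
--             for (other, existing) in data.items()
--             if other != nation and nation not in existing
--         ]
--         for nation in data.keys()
--     }
-- ===== SOURCE B (Python) =====
-- def missing_crosses(reference):
--     """Produce the nations that have not been endorsed by each nation.
--
--     Subtractive version: start each nation's answer as all other nations
--     (as an ordered dict of candidates), then stream the endorsement lists
--     once, deleting `other` from `result[e]` for every endorsement e of other.
--     What remains is exactly the nations e never endorsed.
--     """
--     result = {n: {o: None for o in reference if o != n} for n in reference}
--     for other, endorsers in reference.items():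
--         for e in endorsers:
--             if e in result:
--                 result[e].pop(other, None)
--     return {n: list(cands) for n, cands in result.items()}
-- ===== Notes on version B (the rewrite author's own statement) =====
-- stated objective: alternative
-- what changed: B is subtractive: it initialises each nation's answer to the full ordered list of all other nations and then streams the endorsement lists once, deleting `other` from result[e] for every endorsement, so no membership test against an endorser set ever decides an output entry; A filters every other nation's endorser set per output entry.
import Mathlib
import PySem

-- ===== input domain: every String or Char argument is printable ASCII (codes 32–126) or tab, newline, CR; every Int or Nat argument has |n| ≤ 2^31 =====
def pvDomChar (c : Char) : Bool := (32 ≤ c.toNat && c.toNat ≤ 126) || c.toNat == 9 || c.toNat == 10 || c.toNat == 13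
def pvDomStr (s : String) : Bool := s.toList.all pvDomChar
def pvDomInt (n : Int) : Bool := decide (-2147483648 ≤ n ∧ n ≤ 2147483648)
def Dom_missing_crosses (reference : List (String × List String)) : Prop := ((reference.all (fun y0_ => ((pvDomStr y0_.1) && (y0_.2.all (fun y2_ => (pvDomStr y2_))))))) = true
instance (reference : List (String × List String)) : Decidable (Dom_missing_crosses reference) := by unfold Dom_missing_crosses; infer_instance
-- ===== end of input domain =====

-- B replaces A's per-entry membership-test filter by a subtractive algorithm: each answer starts
-- as the full ordered list of all other nations and endorsements DELETE entries (alternative decomposition, same cost).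


-- ===== PORT A =====
-- the parameter is a Python dict: modelled as PySem.Dict.ofList (duplicate keys collapse as dict(...) does)
def missing_crosses (reference : List (String × List String)) : List (String × List String) :=
  let ref : PySem.Dict String (List String) := PySem.Dict.ofList reference
  -- data = {nation: set(endorsers) for nation, endorsers in reference.items()}
  let data : PySem.Dict String (PySem.Set String) :=
    ref.items.foldl (fun d p => d.insert p.1 (PySem.Set.ofList p.2)) PySem.Dict.empty
  -- {nation: [other for (other, existing) in data.items() if other != nation and nation not in existing] for nation in data.keys()}
  data.keys.map (fun nation =>
    (nation,
      (data.items.filter (fun p => p.1 != nation && !(PySem.Set.contains p.2 nation))).map (·.1)))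

-- ===== PORT B =====
def missing_crosses_alt (reference : List (String × List String)) : List (String × List String) :=
  let ref : PySem.Dict String (List String) := PySem.Dict.ofList reference
  -- result = {n: {o: None for o in reference if o != n} for n in reference}
  let result0 : PySem.Dict String (PySem.Dict String Unit) :=
    ref.keys.foldl (fun r n =>
      r.insert n (ref.keys.foldl (fun d o => if o != n then d.insert o () else d) PySem.Dict.empty))
      PySem.Dict.empty
  -- for other, endorsers in reference.items(): for e in endorsers: if e in result: result[e].pop(other, None)
  let result : PySem.Dict String (PySem.Dict String Unit) :=
    ref.items.foldl
      (fun r p => p.2.foldl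
        (fun r e => if r.contains e then r.modify e PySem.Dict.empty (fun d => d.erase p.1) else r) r)
      result0
  -- {n: list(cands) for n, cands in result.items()}
  result.items.map (fun p => (p.1, p.2.keys))

-- ===== PRECONDITION & SPEC =====
def Spec_missing_crosses (reference : List (String × List String)) (out : List (String × List String)) : Prop := out = missing_crosses_alt reference
instance (reference : List (String × List String)) (out : List (String × List String)) : Decidable (Spec_missing_crosses reference out) := by unfold Spec_missing_crosses; infer_instance

-- ===== CLAIM (what is proved, stated in full; the proofs are below) =====
def Claim_equal_missing_crosses : Prop := ∀ (reference : List (String × List String)), Dom_missing_crosses reference → Spec_missing_crosses reference (missing_crosses reference)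

-- ===== LEMMAS AND PROOFS =====

-- the inner `for e in endorsers` loop never changes the key set of the outer dict
lemma innerB_keys (ends : List String) (v : String)
    (r : PySem.Dict String (PySem.Dict String Unit)) :
    (ends.foldl (fun r e => if r.contains e then r.modify e PySem.Dict.empty (fun d => d.erase v) else r) r).keys = r.keys := by
  induction ends generalizing r with
  | nil => rfl
  | cons e rest ih =>
    simp only [List.foldl_cons]
    by_cases h : r.contains e
    · rw [if_pos h, ih, PySem.Dict.keys_modify, PySem.Dict.keys_insert_of_contains _ _ h]
    · rw [if_neg h, ih]

lemma erase_erase {κ ν : Type} [BEq κ] (d : PySem.Dict κ ν) (k : κ) :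
    (d.erase k).erase k = d.erase k := by
  show PySem.Dict.mk _ = PySem.Dict.mk _
  simp [PySem.Dict.erase, List.filter_filter]

-- what the inner loop does to the value stored at n
lemma innerB_getD (ends : List String) (v : String)
    (r : PySem.Dict String (PySem.Dict String Unit)) (n : String) :
    (ends.foldl (fun r e => if r.contains e then r.modify e PySem.Dict.empty (fun d => d.erase v) else r) r).getD n PySem.Dict.empty =
      if r.contains n = true ∧ n ∈ ends then (r.getD n PySem.Dict.empty).erase v
      else r.getD n PySem.Dict.empty := by
  induction ends generalizing r with
  | nil => simp
  | cons e rest ih =>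
    simp only [List.foldl_cons, List.mem_cons]
    by_cases h : r.contains e
    · rw [if_pos h, ih]
      by_cases hn : n = e
      · subst hn
        rw [PySem.Dict.getD_modify_self, PySem.Dict.contains_modify]
        by_cases hm : n ∈ rest <;> simp [h, hm, erase_erase]
      · rw [PySem.Dict.getD_modify_of_ne r PySem.Dict.empty (fun d => d.erase v) hn, PySem.Dict.contains_modify]
        have hne : (n == e) = false := by simp [hn]
        simp [hne, hn]
    · rw [if_neg h, ih]
      by_cases hn : n = e
      · subst hn; simp [h]
      · simp [hn]

-- what the full endorsement stream does to the value stored at n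
lemma outerB_getD (l : List (String × List String))
    (r : PySem.Dict String (PySem.Dict String Unit)) (n : String)
    (h : r.contains n = true) :
    (l.foldl (fun r p => p.2.foldl
        (fun r e => if r.contains e then r.modify e PySem.Dict.empty (fun d => d.erase p.1) else r) r) r).getD n PySem.Dict.empty =
      (l.filter (fun p => decide (n ∈ p.2))).foldl (fun d p => d.erase p.1) (r.getD n PySem.Dict.empty) := by
  induction l generalizing r with
  | nil => rfl
  | cons p rest ih =>
    simp only [List.foldl_cons, List.filter_cons]
    have hc : (p.2.foldl (fun r e => if r.contains e then r.modify e PySem.Dict.empty (fun d => d.erase p.1) else r) r).contains n = true := by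
      rw [PySem.Dict.contains_eq_decide_mem_keys, innerB_keys, ← PySem.Dict.contains_eq_decide_mem_keys]; exact h
    rw [ih _ hc, innerB_getD]
    by_cases hm : n ∈ p.2
    · simp [h, hm]
    · simp [hm]

-- a sequence of erases is one filter on the key list
lemma foldl_erase_keys (ps : List (String × List String)) (d : PySem.Dict String Unit) :
    (ps.foldl (fun d p => d.erase p.1) d).keys
      = d.keys.filter (fun o => !(ps.any (fun p => p.1 == o))) := by
  induction ps generalizing d with
  | nil => simp
  | cons p rest ih =>
    simp only [List.foldl_cons, ih]
    have : (PySem.Dict.erase d p.1).keys = d.keys.filter (fun o => !(o == p.1)) := by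
      show (List.filter (fun q => !(q.1 == p.1)) d.items).map (fun q => q.1)
          = (d.items.map (fun q => q.1)).filter (fun o => !(o == p.1))
      rw [List.filter_map]
      rfl
    rw [this, List.filter_filter]
    refine List.filter_congr (fun o _ => ?_)
    simp only [List.any_cons, Bool.not_or]
    rw [Bool.and_comm]
    simp [BEq.comm]

-- the key list of the initial per-nation candidate dict
lemma inner0_keys (ks : List String) (n : String) (hnd : ks.Nodup) :
    (ks.foldl (fun d o => if o != n then d.insert o () else d) (PySem.Dict.empty : PySem.Dict String Unit)).keys
      = ks.filter (fun o => o != n) := by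
  rw [PySem.List.foldl_if_eq_foldl_filter]
  rw [PySem.Dict.keys_foldl_insert (f := fun _ _ => ())]
  simp only [PySem.Dict.keys_empty]
  have : PySem.Set.update ([] : PySem.Set String) (ks.filter (fun o => o != n)) = PySem.Set.ofList (ks.filter (fun o => o != n)) := rfl
  rw [this]
  exact PySem.Set.ofList_eq_self_of_nodup _ (hnd.filter _)

-- A's "filter items then take keys" equals "filter the key list" when the test agrees pointwise
lemma filter_fst (l : List (String × List String)) (c : String × PySem.Set String → Bool) (q : String → Bool)
    (h : ∀ p ∈ l, c (p.1, PySem.Set.ofList p.2) = q p.1) :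
    ((l.map (fun p => (p.1, PySem.Set.ofList p.2))).filter c).map (fun p => p.1)
      = (l.map (fun p => p.1)).filter q := by
  induction l with
  | nil => rfl
  | cons p rest ih =>
    simp only [List.map_cons, List.filter_cons]
    rw [h p (List.mem_cons_self ..)]
    cases hq : q p.1 <;>
      simp [ih (fun x hx => h x (List.mem_cons_of_mem _ hx))]

lemma ports_agree (reference : List (String × List String)) :
    missing_crosses reference = missing_crosses_alt reference := by
  unfold missing_crosses missing_crosses_alt
  dsimp only
  set ref : PySem.Dict String (List String) := PySem.Dict.ofList reference with href
  have hnd : ref.keys.Nodup := PySem.Dict.nodup_keys_ofList reference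
  have hnd' : (ref.items.map (fun p => p.1)).Nodup := by simpa [PySem.Dict.keys] using hnd
  -- A's dict comprehension over fresh keys
  have hAitems : (ref.items.foldl (fun d p => d.insert p.1 (PySem.Set.ofList p.2)) PySem.Dict.empty).items
      = ref.items.map (fun p => (p.1, PySem.Set.ofList p.2)) := by
    have := PySem.Dict.items_foldl_insert_fresh ref.items (fun p => p.1) (fun p => PySem.Set.ofList p.2)
      PySem.Dict.empty (by intro a _; simp) hnd'
    simpa using this
  have hAkeys : (ref.items.foldl (fun d p => d.insert p.1 (PySem.Set.ofList p.2)) PySem.Dict.empty).keys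
      = ref.keys := by
    show _root_.List.map (fun p => p.1) (ref.items.foldl (fun d p => d.insert p.1 (PySem.Set.ofList p.2)) PySem.Dict.empty).items = ref.keys
    rw [hAitems, List.map_map]
    rfl
  -- B's result0 over fresh keys
  have hR0items : (ref.keys.foldl (fun r n =>
      r.insert n (ref.keys.foldl (fun d o => if o != n then d.insert o () else d) PySem.Dict.empty))
      PySem.Dict.empty).items
      = ref.keys.map (fun n => (n, ref.keys.foldl (fun d o => if o != n then d.insert o () else d) PySem.Dict.empty)) := by
    have := PySem.Dict.items_foldl_insert_fresh ref.keys (fun n => n)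
      (fun n => ref.keys.foldl (fun d o => if o != n then d.insert o () else d) PySem.Dict.empty)
      PySem.Dict.empty (by intro a _; simp) (by simpa using hnd)
    simpa using this
  set result0 : PySem.Dict String (PySem.Dict String Unit) :=
    ref.keys.foldl (fun r n =>
      r.insert n (ref.keys.foldl (fun d o => if o != n then d.insert o () else d) PySem.Dict.empty))
      PySem.Dict.empty with hres0
  have hR0keys : result0.keys = ref.keys := by
    show result0.items.map (fun p => p.1) = ref.keys
    rw [hres0] at hR0items ⊢
    rw [hR0items, List.map_map]
    exact List.map_id _
  set result : PySem.Dict String (PySem.Dict String Unit) :=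
    ref.items.foldl
      (fun r p => p.2.foldl
        (fun r e => if r.contains e then r.modify e PySem.Dict.empty (fun d => d.erase p.1) else r) r)
      result0 with hres
  have hRkeys : result.keys = ref.keys := by
    rw [hres]
    have : ∀ (l : List (String × List String)) (r : PySem.Dict String (PySem.Dict String Unit)),
        (l.foldl (fun r p => p.2.foldl
          (fun r e => if r.contains e then r.modify e PySem.Dict.empty (fun d => d.erase p.1) else r) r) r).keys = r.keys := by
      intro l
      induction l with
      | nil => intro r; rfl
      | cons p rest ih => intro r; simp only [List.foldl_cons]; rw [ih, innerB_keys]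
    rw [this, hR0keys]
  have hRnodup : result.keys.Nodup := hRkeys ▸ hnd
  have hRitems : result.items = result.keys.map (fun k => (k, result.getD k PySem.Dict.empty)) :=
    PySem.Dict.items_eq_map_keys result hRnodup PySem.Dict.empty
  rw [hAkeys, hRitems, hRkeys, List.map_map]
  refine List.map_congr_left (fun nation hnat => ?_)
  simp only [Function.comp]
  refine Prod.ext rfl ?_
  -- left side: A's list for `nation`
  -- right side: keys of result.getD nation
  have hcont0 : result0.contains nation = true := by
    rw [PySem.Dict.contains_eq_decide_mem_keys, hR0keys]; simpa using hnat
  have hget0 : result0.getD nation PySem.Dict.empty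
      = ref.keys.foldl (fun d o => if o != nation then d.insert o () else d) PySem.Dict.empty := by
    have hmem : (nation, ref.keys.foldl (fun d o => if o != nation then d.insert o () else d) PySem.Dict.empty) ∈ result0.items := by
      rw [hres0, hR0items]
      exact List.mem_map.mpr ⟨nation, hnat, rfl⟩
    exact PySem.Dict.getD_of_mem_items result0 hmem (hR0keys ▸ hnd) PySem.Dict.empty
  have hgetR : result.getD nation PySem.Dict.empty
      = (ref.items.filter (fun p => decide (nation ∈ p.2))).foldl (fun d p => d.erase p.1)
          (ref.keys.foldl (fun d o => if o != nation then d.insert o () else d) PySem.Dict.empty) := by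
    rw [hres, outerB_getD _ _ _ hcont0, hget0]
  rw [hgetR, foldl_erase_keys, inner0_keys _ _ hnd, List.filter_filter, hAitems]
  have hk : ref.keys = ref.items.map (fun p => p.1) := rfl
  rw [hk]
  refine filter_fst _ _ _ (fun p hp => ?_)
  have hany : (ref.items.filter (fun p => decide (nation ∈ p.2))).any (fun r => r.1 == p.1)
      = decide (nation ∈ p.2) := by
    rw [Bool.eq_iff_iff]
    simp only [List.any_eq_true, List.mem_filter, decide_eq_true_eq, beq_iff_eq]
    constructor
    · rintro ⟨r, ⟨hr, hmem⟩, hkk⟩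
      have : r = p := List.inj_on_of_nodup_map hnd' hr hp hkk
      subst this; exact hmem
    · intro hmem; exact ⟨p, ⟨hp, hmem⟩, rfl⟩
  have hset : PySem.Set.contains (PySem.Set.ofList p.2) nation = decide (nation ∈ p.2) := by
    rw [Bool.eq_iff_iff, PySem.Set.contains_iff, PySem.Set.mem_ofList]; simp
  simp only [hany, hset]
  exact Bool.and_comm _ _

-- ===== VERDICT (by name: the statement is the Claim_ definition above) =====
theorem missing_crosses_spec : Claim_equal_missing_crosses := by
  intro reference _
  exact ports_agree reference
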